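-- pv_equiv track=rewrite | github.com/MariusPasch/Thesis-Python-Code | MCDM Creation/CriteriaCreation.py | sports
-- ===== SOURCE A (Python) =====
-- def sports(lst):
-- 	basic = ['Fitness Center with Gym / Workout Room', 'Billiards', 'Table tennis', 'Game room',
-- 	         'Darts','Fitness classes', 'Aerobics', 'Yoga classes',
-- 	         'Fitness Centre with Gym / Workout Room']
-- 	special = ['Tennis court', 'Diving', 'Horseback riding', 'Fishing', 'Windsurfing',
--        'Golf course', 'Canoeing', 'Mini golf', 'Water park', 'Hiking']
--
-- 	if any(x in lst for x in basic+special) is False: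
-- 		return 0
-- 	elif any(x in lst for x in special):
-- 		return 2
-- 	else:
-- 		return 1
-- ===== SOURCE B (Python) =====
-- def sports(lst):
--     basic = {'Fitness Center with Gym / Workout Room', 'Billiards', 'Table tennis', 'Game room',
--              'Darts', 'Fitness classes', 'Aerobics', 'Yoga classes',
--              'Fitness Centre with Gym / Workout Room'}
--     special = {'Tennis court', 'Diving', 'Horseback riding', 'Fishing', 'Windsurfing',
--                'Golf course', 'Canoeing', 'Mini golf', 'Water park', 'Hiking'}
--     has_basic = False
--     for x in lst:
--         if x in special:
--             return 2
--         if x in basic: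
--             has_basic = True
--     return 1 if has_basic else 0
-- ===== Notes on version B (the rewrite author's own statement) =====
-- stated objective: alternative
-- what changed: B makes a single early-exit pass over lst checking each element against constant sets, instead of A's three scans of the constant candidate lists each doing a membership scan of lst.
import Mathlib
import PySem

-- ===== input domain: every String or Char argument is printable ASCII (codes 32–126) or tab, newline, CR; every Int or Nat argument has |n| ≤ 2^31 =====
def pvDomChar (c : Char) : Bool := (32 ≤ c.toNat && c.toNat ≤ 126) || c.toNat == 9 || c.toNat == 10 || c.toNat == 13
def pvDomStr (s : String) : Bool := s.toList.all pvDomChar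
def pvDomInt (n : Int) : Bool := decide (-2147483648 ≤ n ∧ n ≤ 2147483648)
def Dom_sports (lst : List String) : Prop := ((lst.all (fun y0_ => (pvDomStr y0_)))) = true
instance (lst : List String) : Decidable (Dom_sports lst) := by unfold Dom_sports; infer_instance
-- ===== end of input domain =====

-- B replaces A's three scans over the constant candidate lists (each scanning lst) by one
-- early-exit pass over lst against constant sets; same return value everywhere (alternative decomposition).

-- ===== PORT A =====
def sportsBasic : List String :=
  ["Fitness Center with Gym / Workout Room", "Billiards", "Table tennis", "Game room",
   "Darts", "Fitness classes", "Aerobics", "Yoga classes",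
   "Fitness Centre with Gym / Workout Room"]

def sportsSpecial : List String :=
  ["Tennis court", "Diving", "Horseback riding", "Fishing", "Windsurfing",
   "Golf course", "Canoeing", "Mini golf", "Water park", "Hiking"]

def sports (lst : List String) : Int :=
  if ((sportsBasic ++ sportsSpecial).any (fun x => lst.contains x)) = false then 0
  else if sportsSpecial.any (fun x => lst.contains x) then 2
  else 1

-- ===== PORT B =====
def sportsBasicSet : PySem.Set String := PySem.Set.ofList sportsBasic
def sportsSpecialSet : PySem.Set String := PySem.Set.ofList sportsSpecial

-- the single classifying pass of Source B: early return 2 on a special, flag a basic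
def sportsLoop : List String → Bool → Int
  | [], hasBasic => if hasBasic then 1 else 0
  | x :: rest, hasBasic =>
      if PySem.Set.contains sportsSpecialSet x then 2
      else sportsLoop rest (hasBasic || PySem.Set.contains sportsBasicSet x)

def sports_alt (lst : List String) : Int := sportsLoop lst false

-- ===== PRECONDITION & SPEC =====
def Spec_sports (lst : List String) (out : Int) : Prop := out = sports_alt lst
instance (lst : List String) (out : Int) : Decidable (Spec_sports lst out) := by unfold Spec_sports; infer_instance

-- ===== CLAIM (what is proved, stated in full; the proofs are below) =====
def Claim_equal_sports : Prop := ∀ (lst : List String), Dom_sports lst → Spec_sports lst (sports lst)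

-- ===== LEMMAS AND PROOFS =====
lemma sportsLoop_eq (lst : List String) (hb : Bool) :
    sportsLoop lst hb =
      if lst.any (fun x => PySem.Set.contains sportsSpecialSet x) then 2
      else if hb || lst.any (fun x => PySem.Set.contains sportsBasicSet x) then 1 else 0 := by
  induction lst generalizing hb with
  | nil => simp [sportsLoop]
  | cons x rest ih =>
      simp only [sportsLoop, List.any_cons]
      cases hs : PySem.Set.contains sportsSpecialSet x
      · simp only [Bool.false_or, ih]
        cases hr : rest.any (fun x => PySem.Set.contains sportsSpecialSet x)
        · simp [Bool.or_assoc]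
        · simp
      · simp

lemma scan_swap (cands lst : List String) :
    (cands.any (fun x => lst.contains x)) = (lst.any (fun x => PySem.Set.contains (PySem.Set.ofList cands) x)) := by
  apply Bool.eq_iff_iff.mpr
  simp only [List.any_eq_true, List.contains_iff_mem, PySem.Set.contains_iff, PySem.Set.mem_ofList]
  tauto

-- ===== VERDICT (by name: the statement is the Claim_ definition above) =====
theorem sports_spec : Claim_equal_sports := by
  intro lst _
  unfold Spec_sports sports sports_alt
  rw [sportsLoop_eq]
  have hA : ((sportsBasic ++ sportsSpecial).any (fun x => lst.contains x))
      = (lst.any (fun x => PySem.Set.contains sportsBasicSet x)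
         || lst.any (fun x => PySem.Set.contains sportsSpecialSet x)) := by
    rw [List.any_append, scan_swap, scan_swap]; rfl
  have hS : (sportsSpecial.any (fun x => lst.contains x))
      = lst.any (fun x => PySem.Set.contains sportsSpecialSet x) := scan_swap _ _
  rw [hA, hS]
  cases h1 : lst.any (fun x => PySem.Set.contains sportsSpecialSet x) <;>
    cases h2 : lst.any (fun x => PySem.Set.contains sportsBasicSet x) <;>
      simp
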